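-- pv_equiv track=rewrite | github.com/HOZH/leetCode | leetCodePython2020/temp.py | foo
-- ===== SOURCE A (Python) =====
-- def foo(arr):
--
--     left_sum, right_sum = sum(arr), 0
--
--     count = 0
--
--     for i in range(len(arr)-1, 0, -1):
--
--         temp = arr[i]
--
--         left_sum -= temp
--         right_sum += temp
--
--         count += 0 if left_sum <= right_sum else 1
--
--     return count
-- ===== SOURCE B (Python) =====
-- def foo(arr):
--     total = sum(arr)
--     ps = []
--     s = 0
--     for x in arr[:-1]:
--         s += x
--         ps.append(s)
--     ps.sort()
--     lo, hi = 0, len(ps)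
--     while lo < hi:
--         mid = (lo + hi) // 2
--         if 2 * ps[mid] <= total:
--             lo = mid + 1
--         else:
--             hi = mid
--     return len(ps) - lo
-- ===== Notes on version B (the rewrite author's own statement) =====
-- stated objective: alternative
-- what changed: B recasts the count as a rank query: it builds the prefix-sum table of arr[:-1], sorts it, and binary-searches for the threshold total/2 (answer = elements with 2*p > total), instead of A's backward scan maintaining running left/right sums and a counter.
import Mathlib
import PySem

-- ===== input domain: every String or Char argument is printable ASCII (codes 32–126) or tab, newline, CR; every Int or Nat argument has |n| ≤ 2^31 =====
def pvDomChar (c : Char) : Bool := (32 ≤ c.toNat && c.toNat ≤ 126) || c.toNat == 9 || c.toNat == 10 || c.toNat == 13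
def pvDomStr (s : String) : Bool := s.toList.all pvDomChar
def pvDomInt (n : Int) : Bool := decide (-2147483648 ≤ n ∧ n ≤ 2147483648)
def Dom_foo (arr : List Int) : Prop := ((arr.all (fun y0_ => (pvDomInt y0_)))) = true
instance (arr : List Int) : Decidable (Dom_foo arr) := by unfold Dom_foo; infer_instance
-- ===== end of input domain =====

-- B counts splits by sorting the prefix-sum table and binary-searching the threshold, instead of A's backward running-sums scan (alternative algorithm, not claimed faster).

-- ===== PORT A =====
def foo (arr : List Int) : Int :=
  let fin := (PySem.List.pyRange ((arr.length : Int) - 1) 0 (-1)).foldl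
    (fun (st : Int × Int × Int) i =>
      let temp := PySem.List.pyGetD arr i 0
      let left := st.1 - temp
      let right := st.2.1 + temp
      (left, right, st.2.2 + (if left ≤ right then 0 else 1)))
    (arr.sum, 0, 0)
  fin.2.2

-- ===== PORT B =====
-- the while-loop: lo, hi with mid = (lo + hi) // 2
def fooBS (ps : List Int) (total lo hi : Int) : Int :=
  if h : lo < hi then
    let mid := PySem.Int.floordiv (lo + hi) 2
    if 2 * PySem.List.pyGetD ps mid 0 ≤ total then fooBS ps total (mid + 1) hi
    else fooBS ps total lo mid
  else lo
termination_by (hi - lo).toNat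
decreasing_by
  · have h1 : lo ≤ PySem.Int.floordiv (lo + hi) 2 :=
      (PySem.Int.floordiv_two_mid_bounds (le_of_lt h)).1
    omega
  · have h2 : PySem.Int.floordiv (lo + hi) 2 < hi :=
      (PySem.Int.floordiv_lt_iff_lt_mul (by norm_num)).2 (by omega)
    omega

def foo_alt (arr : List Int) : Int :=
  let total := arr.sum
  let p := (PySem.List.slice arr none (some (-1))).foldl
    (fun (q : Int × List Int) x => (q.1 + x, q.2 ++ [q.1 + x])) (0, [])
  let ps := PySem.List.sorted p.2 (fun x => x) false
  (ps.length : Int) - fooBS ps total 0 (ps.length : Int)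

-- ===== PRECONDITION & SPEC =====
def Spec_foo (arr : List Int) (out : Int) : Prop := out = foo_alt arr
instance (arr : List Int) (out : Int) : Decidable (Spec_foo arr out) := by unfold Spec_foo; infer_instance

-- ===== CLAIM (what is proved, stated in full; the proofs are below) =====
def Claim_equal_foo : Prop := ∀ (arr : List Int), Dom_foo arr → Spec_foo arr (foo arr)

-- ===== LEMMAS AND PROOFS =====
-- running prefix sums starting from accumulator a
def prefixSums (a : Int) : List Int → List Int
  | [] => []
  | x :: xs => (a + x) :: prefixSums (a + x) xs

theorem prefixSums_shift (l : List Int) : ∀ (a b : Int),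
    prefixSums (a + b) l = (prefixSums b l).map (a + ·) := by
  induction l with
  | nil => intro a b; simp [prefixSums]
  | cons x xs ih => intro a b; simp [prefixSums, add_assoc, ih]

theorem prefixSums_append (u v : List Int) : ∀ (a : Int),
    prefixSums a (u ++ v) = prefixSums a u ++ prefixSums (a + u.sum) v := by
  induction u with
  | nil => intro a; simp [prefixSums]
  | cons x xs ih => intro a; simp [prefixSums, ih, add_assoc]

-- suffix sums are reversed complemented prefix sums
theorem rev_pref (l : List Int) :
    prefixSums 0 l.reverse
      = (((0 :: prefixSums 0 l).dropLast).reverse).map (fun p => l.sum - p) := by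
  induction l with
  | nil => simp [prefixSums]
  | cons x xs ih =>
    have h1 : prefixSums 0 (x :: xs) = x :: (prefixSums 0 xs).map (x + ·) := by
      have := prefixSums_shift xs x 0
      simp [prefixSums] at this ⊢
      rw [← this]
    rw [List.reverse_cons, prefixSums_append, ih, h1]
    have h2 : (0 :: x :: (prefixSums 0 xs).map (x + ·)).dropLast
        = 0 :: ((x :: (prefixSums 0 xs).map (x + ·)).dropLast) := by
      simp [List.dropLast_cons_of_ne_nil]
    have h3 : x :: (prefixSums 0 xs).map (x + ·) = (0 :: prefixSums 0 xs).map (x + ·) := by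
      simp
    rw [h2, h3, ← List.map_dropLast]
    simp [prefixSums, List.map_map]
    refine ⟨?_, by ring⟩
    rw [show ((fun p => x + xs.sum - p) ∘ fun y => x + y) = fun p => xs.sum - p from by
      funext p; dsimp; ring]

-- prefixSums commutes with dropLast
theorem prefixSums_dropLast (l : List Int) : ∀ (a : Int),
    prefixSums a l.dropLast = (prefixSums a l).dropLast := by
  induction l with
  | nil => intro a; simp [prefixSums]
  | cons x xs ih =>
    intro a
    cases xs with
    | nil => simp [prefixSums]
    | cons y ys =>
      rw [List.dropLast_cons_of_ne_nil (by simp)]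
      simp only [prefixSums, ih]
      conv_rhs => rw [List.dropLast_cons_of_ne_nil (by simp)]

-- B's first loop builds (a + sum l, acc ++ prefixSums a l)
theorem bfold (l : List Int) : ∀ (a : Int) (acc : List Int),
    l.foldl (fun (p : Int × List Int) x => (p.1 + x, p.2 ++ [p.1 + x])) (a, acc)
      = (a + l.sum, acc ++ prefixSums a l) := by
  induction l with
  | nil => intro a acc; simp [prefixSums]
  | cons x xs ih => intro a acc; simp [prefixSums, ih, add_assoc]

-- A's element-level step
def stepA (t : Int) (st : Int × Int × Int) : Int × Int × Int :=
  (st.1 - t, st.2.1 + t, st.2.2 + (if st.1 - t ≤ st.2.1 + t then 0 else 1))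

-- A's index loop over range(m, 0, -1) is a fold over the reversed slice arr[1:m+1]
theorem afold_idx (arr : List Int) : ∀ (m : Nat), m < arr.length → ∀ (st : Int × Int × Int),
    (PySem.List.pyRange (m : Int) 0 (-1)).foldl
      (fun (st : Int × Int × Int) i =>
        let temp := PySem.List.pyGetD arr i 0
        let left := st.1 - temp
        let right := st.2.1 + temp
        (left, right, st.2.2 + (if left ≤ right then 0 else 1))) st
      = (((arr.take (m+1)).drop 1).reverse).foldl (fun st t => stepA t st) st := by
  intro m
  induction m with
  | zero =>
    intro _ st
    rw [PySem.List.pyRange_neg_one_eq_nil (by norm_num)]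
    cases arr <;> simp
  | succ m ih =>
    intro hm st
    have hm' : m < arr.length := Nat.lt_of_succ_lt hm
    rw [show ((m + 1 : Nat) : Int) = (m : Int) + 1 by push_cast; ring]
    rw [PySem.List.pyRange_neg_one_cons (by positivity)]
    have hget : PySem.List.pyGetD arr ((m : Int) + 1) 0 = arr[m+1]'hm := by
      have := PySem.List.pyGetD_natCast arr (m+1) 0
      push_cast at this
      rw [this, List.getD_eq_getElem?_getD, List.getElem?_eq_getElem hm]
      rfl
    have htake : arr.take (m+1+1) = arr.take (m+1) ++ [arr[m+1]'hm] := by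
      rw [List.take_add_one, List.getElem?_eq_getElem hm]
      rfl
    simp only [List.foldl_cons, hget]
    rw [show ((m : Int) + 1 - 1) = (m : Int) by ring, ih hm']
    rw [htake]
    have hlen : 1 ≤ (arr.take (m+1)).length := by
      simp [List.length_take]
      omega
    rw [List.drop_append_of_le_length hlen, List.reverse_append]
    simp [stepA]

-- the element-level fold counts prefix sums exceeding the remaining left sum
theorem afold_count (l : List Int) : ∀ (L R c : Int),
    (l.foldl (fun st t => stepA t st) (L, R, c)).2.2
      = c + (((prefixSums R l).filter (fun s => decide (L + R - s > s))).length : Int) := by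
  induction l with
  | nil => intro L R c; simp [prefixSums]
  | cons x xs ih =>
    intro L R c
    rw [List.foldl_cons,
        show stepA x (L, R, c) = (L - x, R + x, c + if L - x ≤ R + x then 0 else 1) from rfl,
        ih]
    simp only [prefixSums, List.filter]
    by_cases h : L + R - (R + x) > R + x
    · have h2 : ¬ (L - x ≤ R + x) := by omega
      simp [h, h2, show L - x + (R + x) = L + R from by ring]
      ring
    · have h2 : L - x ≤ R + x := by omega
      simp [h, h2, show L - x + (R + x) = L + R from by ring]

-- if a predicate holds exactly on the first k positions, the filter has length k
theorem filter_len (q : Int → Bool) : ∀ (s : List Int) (k : Nat), k ≤ s.length →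
    (∀ (i : Nat) (h : i < s.length), q s[i] = true ↔ i < k) →
    (s.filter q).length = k := by
  intro s
  induction s with
  | nil => intro k hk _; simp at hk ⊢; omega
  | cons x xs ih =>
    intro k hk hq
    cases k with
    | zero =>
      have hx : q x = false := by
        have := hq 0 (by simp)
        simpa using this
      have hall : ∀ y ∈ xs, q y = false := by
        intro y hy
        obtain ⟨i, hi, rfl⟩ := List.getElem_of_mem hy
        have := hq (i+1) (by simpa using Nat.succ_lt_succ hi)
        simpa using this
      rw [List.filter_cons, if_neg (by simp [hx]),
          List.filter_eq_nil_iff.2 (by intro y hy; simp [hall y hy])]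
      rfl
    | succ k' =>
      have hx : q x = true := by
        have := hq 0 (by simp); simpa using this
      rw [List.filter_cons, if_pos hx]
      simp only [List.length_cons]
      rw [ih k' (by simpa using hk)]
      intro i hi
      have := hq (i+1) (by simpa using Nat.succ_lt_succ hi)
      simpa using this

-- the binary search returns the number of elements ≤ threshold, on a sorted list
theorem bs_inv (s : List Int) (t : Int) (hs : s.Pairwise (· ≤ ·)) :
    ∀ (n : Nat) (lo hi : Int), (hi - lo).toNat = n → 0 ≤ lo → lo ≤ hi → hi ≤ (s.length : Int) →
    (∀ (i : Nat) (h : i < s.length), (i : Int) < lo → 2 * s[i] ≤ t) →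
    (∀ (i : Nat) (h : i < s.length), hi ≤ (i : Int) → ¬ (2 * s[i] ≤ t)) →
    fooBS s t lo hi = ((s.filter (fun e => decide (2 * e ≤ t))).length : Int) := by
  have hmono : ∀ (i j : Nat) (hi2 : i < s.length) (hj : j < s.length), i ≤ j → s[i] ≤ s[j] := by
    intro i j hi2 hj hij
    rcases eq_or_lt_of_le hij with rfl | hlt
    · exact le_refl _
    · exact (List.pairwise_iff_getElem.1 hs) i j (by omega) hj hlt
  intro n
  induction n using Nat.strong_induction_on with
  | _ n ih =>
    intro lo hi hn h0 hlh hhl hlow hhigh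
    by_cases h : lo < hi
    · rw [fooBS, dif_pos h]
      have hb1 : lo ≤ PySem.Int.floordiv (lo + hi) 2 :=
        (PySem.Int.floordiv_two_mid_bounds (le_of_lt h)).1
      have hb2 : PySem.Int.floordiv (lo + hi) 2 < hi :=
        (PySem.Int.floordiv_lt_iff_lt_mul (by norm_num)).2 (by omega)
      set mid := PySem.Int.floordiv (lo + hi) 2 with hmid
      have hmlt : mid.toNat < s.length := by omega
      have hget : PySem.List.pyGetD s mid 0 = s[mid.toNat] := by
        apply PySem.List.pyGetD_eq_getElem <;> omega
      simp only [hget]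
      by_cases hc : 2 * s[mid.toNat] ≤ t
      · rw [if_pos hc]
        apply ih (hi - (mid + 1)).toNat (by omega) (mid + 1) hi rfl (by omega) (by omega) hhl
        · intro i hilen hilt
          by_cases hio : (i : Int) < lo
          · exact hlow i hilen hio
          · calc 2 * s[i] ≤ 2 * s[mid.toNat] := by
                  have := hmono i mid.toNat (by omega) hmlt (by omega)
                  omega
              _ ≤ t := hc
        · exact hhigh
      · rw [if_neg hc]
        apply ih (mid - lo).toNat (by omega) lo mid rfl h0 (by omega) (by omega) hlow
        intro i hilen hile
        have := hmono mid.toNat i (by omega) hilen (by omega)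
        omega
    · have heq : lo = hi := le_antisymm hlh (not_lt.1 h)
      rw [fooBS, dif_neg h]
      have hfl := filter_len (fun e => decide (2 * e ≤ t)) s lo.toNat (by omega) ?_
      · rw [hfl]; omega
      · intro i hilen
        simp only [decide_eq_true_eq]
        constructor
        · intro hcond
          by_contra hge
          exact hhigh i hilen (by omega) hcond
        · intro hlt
          exact hlow i hilen (by omega)


-- B's port computes the same count as a filter over the unsorted prefix-sum table
theorem fooB_eq (arr : List Int) :
    foo_alt arr = (((prefixSums 0 arr.dropLast).filter
      (fun p => decide (arr.sum < 2 * p))).length : Int) := by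
  unfold foo_alt
  simp only [PySem.List.slice_to_neg_one, bfold, List.nil_append]
  set P := prefixSums 0 arr.dropLast with hPdef
  set S := PySem.List.sorted P (fun x => x) false with hSdef
  have hs : S.Pairwise (· ≤ ·) := PySem.List.sorted_pairwise P (fun x => x)
  have hperm : S.Perm P := PySem.List.sorted_perm P _ _
  rw [bs_inv S arr.sum hs S.length 0 (S.length : Int) (by simp) (by omega)
      (by exact_mod_cast Nat.zero_le _) (le_refl _)
      (by intro i h hi0; exact absurd hi0 (by exact_mod_cast Nat.not_lt_zero i))
      (by intro i h hge; exact absurd hge (by exact_mod_cast Nat.not_le.2 h))]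
  have hc := List.length_eq_length_filter_add (l := S) (fun e => decide (2 * e ≤ arr.sum))
  have hnot : S.filter (fun e => !decide (2 * e ≤ arr.sum))
      = S.filter (fun e => decide (arr.sum < 2 * e)) := by
    apply List.filter_congr
    intro x _
    by_cases hh : 2 * x ≤ arr.sum
    · simp [hh]
    · simp [hh]
      omega
  rw [hnot] at hc
  have hl := (hperm.filter (fun e => decide (arr.sum < 2 * e))).length_eq
  omega

-- A's port computes the same filter over the same table
theorem fooA_eq (a0 : Int) (rest : List Int) :
    foo (a0 :: rest) = (((prefixSums 0 ((a0 :: rest).dropLast)).filter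
      (fun p => decide ((a0 :: rest).sum < 2 * p))).length : Int) := by
  set arr := a0 :: rest with harr
  unfold foo
  have hlen : 1 ≤ arr.length := by rw [harr]; simp
  simp only
  have hn1 : ((arr.length : Int) - 1) = ((arr.length - 1 : Nat) : Int) := by push_cast [hlen]; ring
  rw [hn1, afold_idx arr (arr.length - 1) (by omega), afold_count]
  have htk : arr.take (arr.length - 1 + 1) = arr := by rw [Nat.sub_add_cancel hlen]; simp
  rw [htk]
  have hdrop : arr.drop 1 = rest := by rw [harr]; simp
  rw [hdrop, rev_pref rest, List.filter_map, List.length_map, List.filter_reverse,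
      List.length_reverse]
  have hmap : prefixSums 0 (a0 :: rest) = (0 :: prefixSums 0 rest).map (fun p => a0 + p) := by
    have := prefixSums_shift rest a0 0
    simp only [add_zero] at this
    simp [prefixSums, this]
  have hP : prefixSums 0 (arr.dropLast)
      = ((0 :: prefixSums 0 rest).dropLast).map (fun p => a0 + p) := by
    rw [harr, prefixSums_dropLast, hmap, ← List.map_dropLast]
  rw [hP, List.filter_map, List.length_map]
  have hpt : ∀ p ∈ (0 :: prefixSums 0 rest).dropLast,
      ((fun s => decide (arr.sum + 0 - s > s)) ∘ (fun p => rest.sum - p)) p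
        = ((fun q => decide (arr.sum < 2 * q)) ∘ (fun p => a0 + p)) p := by
    intro p _
    simp only [Function.comp, decide_eq_decide, harr, List.sum_cons, gt_iff_lt]
    omega
  rw [List.filter_congr hpt]
  ring

-- ===== VERDICT (by name: the statement is the Claim_ definition above) =====
theorem foo_spec : Claim_equal_foo := by
  intro arr _
  unfold Spec_foo
  cases arr with
  | nil =>
    rw [fooB_eq]
    unfold foo
    simp only
    rw [show ((([] : List Int).length : Int) - 1) = -1 by simp,
        PySem.List.pyRange_neg_one_eq_nil (by norm_num)]
    simp [prefixSums]
  | cons a0 rest => rw [fooA_eq, fooB_eq]
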